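-- pv_equiv track=rewrite | github.com/WhoKnowsWhoCares/Guidelines | cp_utils/algoritms/greedy_2.py | greedy2
-- ===== SOURCE A (Python) =====
-- def greedy2(n):
-- 	sum_num = 0
-- 	counter = 1
-- 	additives = []
-- 	while True:
-- 		if sum_num + counter > n: break
-- 		sum_num += counter
-- 		additives.append(counter)
-- 		counter += 1
-- 	additive = n - sum_num
-- 	if  additive <= counter-1:
-- 		additives[len(additives)-1] += (n-sum_num)
-- 	return additives
-- ===== SOURCE B (Python) =====
-- def _isqrt(x):
--     r = x
--     y = (x + 1) // 2
--     while y < r: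
--         r = y
--         y = (r + x // r) // 2
--     return r
--
--
-- def greedy2(n):
--     m = (_isqrt(8 * n + 1) - 1) // 2
--     additives = list(range(1, m + 1))
--     additives[-1] += n - m * (m + 1) // 2
--     return additives
-- ===== Notes on version B (the rewrite author's own statement) =====
-- stated objective: faster
-- what changed: Replaces A's incremental while-loop that accumulates consecutive summands (O(sqrt n) iterations) with a closed-form computation of the maximal triangular index m via a Newton integer square root (O(log n) iterations), then builds range(1, m+1) and adds the remainder to the last element.
-- outside the precondition, e.g. on greedy2(0): A raises IndexError, B raises IndexError
import Mathlib
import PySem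

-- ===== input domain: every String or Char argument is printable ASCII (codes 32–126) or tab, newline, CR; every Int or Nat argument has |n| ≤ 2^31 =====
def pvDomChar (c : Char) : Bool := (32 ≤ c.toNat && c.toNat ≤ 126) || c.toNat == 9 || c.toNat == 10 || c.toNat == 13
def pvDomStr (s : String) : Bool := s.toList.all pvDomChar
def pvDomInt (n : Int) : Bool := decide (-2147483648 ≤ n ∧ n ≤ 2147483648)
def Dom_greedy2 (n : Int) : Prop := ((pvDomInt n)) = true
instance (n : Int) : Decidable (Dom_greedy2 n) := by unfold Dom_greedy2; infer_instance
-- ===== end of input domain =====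

-- B replaces A's O(√n) accumulation loop by a closed-form triangular index m obtained
-- with a hand-written Newton integer square root (O(log n) iterations); objective: faster.

-- ===== PORT A =====
-- A's 'while True' loop; fuel is only a totality guard (n.toNat+1 steps always suffice).
def loopA (fuel : Nat) (n sumNum counter : Int) (adds : List Int) : Int × Int × List Int :=
  match fuel with
  | 0 => (sumNum, counter, adds)
  | f + 1 =>
    if sumNum + counter > n then (sumNum, counter, adds)
    else loopA f n (sumNum + counter) (counter + 1) (adds ++ [counter])

def greedy2 (n : Int) : List Int :=
  let r := loopA (n.toNat + 1) n 0 1 []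
  let sumNum := r.1
  let counter := r.2.1
  let adds := r.2.2
  let additive := n - sumNum
  if additive ≤ counter - 1 then
    -- additives[len(additives)-1] += (n - sum_num); Pre_ guarantees adds ≠ [] (Python raises IndexError on [])
    adds.set (adds.length - 1) (adds.getD (adds.length - 1) 0 + (n - sumNum))
  else adds

-- ===== PORT B =====
-- Newton iteration from Source B's _isqrt; r/y stay Nats: inside Pre_ (n ≥ 1) x = 8n+1 ≥ 9 and
-- all of Python's values here are nonnegative, so Nat division = Python //.
def isqrtAux (x r y : Nat) : Nat :=
  if y < r then isqrtAux x y ((y + x / y) / 2) else r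
termination_by r

def isqrtNewton (x : Nat) : Nat := isqrtAux x x ((x + 1) / 2)

def greedy2_alt (n : Int) : List Int :=
  let m : Nat := (isqrtNewton (8 * n + 1).toNat - 1) / 2
  let additives : List Int := (List.range' 1 m).map Int.ofNat  -- list(range(1, m+1))
  let i := additives.length - 1
  -- additives[-1] += n - m*(m+1)//2 ; Pre_ guarantees the list nonempty (Python raises on [])
  additives.set i (additives.getD i 0 + (n - ((m * (m + 1) / 2 : Nat) : Int)))

-- ===== PRECONDITION & SPEC =====
-- Pre_ excludes n ≤ 0, on which both Pythons raise IndexError (additives[-1] on an empty list).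
def Pre_greedy2 (n : Int) : Prop := 1 ≤ n
instance (n : Int) : Decidable (Pre_greedy2 n) := by unfold Pre_greedy2; infer_instance
def pvWitness_greedy2 : Int := (7)

def Spec_greedy2 (n : Int) (out : List Int) : Prop := out = greedy2_alt n
instance (n : Int) (out : List Int) : Decidable (Spec_greedy2 n out) := by unfold Spec_greedy2; infer_instance

-- ===== CLAIM (what is proved, stated in full; the proofs are below) =====
def Claim_equal_greedy2 : Prop := ∀ (n : Int), Dom_greedy2 n → Pre_greedy2 n → Spec_greedy2 n (greedy2 n)

-- ===== LEMMAS AND PROOFS =====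

-- triangular numbers
def T : Nat → Int
  | 0 => 0
  | k + 1 => T k + (k + 1)

theorem T_mono {k m : Nat} (h : k ≤ m) : T k ≤ T m := by
  induction m with
  | zero => simp_all
  | succ m ih =>
    rcases Nat.lt_or_ge k (m + 1) with h' | h'
    · have h1 := ih (by omega)
      have h2 : (0 : Int) ≤ (m : Int) + 1 := by positivity
      simp [T]; omega
    · have : k = m + 1 := by omega
      subst this; rfl

theorem T_ge (m : Nat) : (m : Int) ≤ T m := by
  induction m with
  | zero => simp [T]
  | succ m ih => simp [T]; omega

theorem two_T (m : Nat) : 2 * T m = (m : Int) * ((m : Int) + 1) := by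
  induction m with
  | zero => simp [T]
  | succ m ih => simp [T]; push_cast at *; ring_nf; ring_nf at ih; omega

theorem T_closed (m : Nat) : T m = ((m * (m + 1) / 2 : Nat) : Int) := by
  have h2 : 2 * T m = (m : Int) * ((m : Int) + 1) := by
    have := two_T m; push_cast at this ⊢; linarith
  have he : 2 * (m * (m + 1) / 2) = m * (m + 1) := by
    obtain ⟨c, hc⟩ := Nat.even_mul_succ_self m
    omega
  have hi : (2 : Int) * ((m * (m + 1) / 2 : Nat) : Int) = (m : Int) * ((m : Int) + 1) := by
    exact_mod_cast congrArg (fun t : Nat => (t : Int)) he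
  omega

-- A's loop, characterised: from sum = T k, counter = k+1, it ends at the maximal m
theorem loopA_spec (n : Int) (m : Nat) (h1 : T m ≤ n) (h2 : n < T m + ((m : Int) + 1)) :
    ∀ (fuel k : Nat) (adds : List Int), k ≤ m → m - k ≤ fuel →
      loopA fuel n (T k) ((k : Int) + 1) adds
        = (T m, (m : Int) + 1, adds ++ (List.range' (k + 1) (m - k)).map Int.ofNat) := by
  intro fuel
  induction fuel with
  | zero =>
    intro k adds hk hf
    have : k = m := by omega
    subst this
    simp [loopA]
  | succ f ih =>
    intro k adds hk hf
    rcases Nat.lt_or_ge k m with hlt | hge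
    · have hcond : ¬ (T k + ((k : Int) + 1) > n) := by
        have : T (k + 1) ≤ T m := T_mono (by omega)
        simp [T] at this
        omega
      have step : T k + ((k : Int) + 1) = T (k + 1) := by simp only [T]
      have step2 : ((k : Int) + 1) + 1 = ((k + 1 : Nat) : Int) + 1 := by push_cast; ring
      rw [loopA, if_neg hcond, step, step2, ih (k + 1) (adds ++ [(k : Int) + 1]) (by omega) (by omega)]
      have hr : List.range' (k + 1) (m - k) = (k + 1) :: List.range' (k + 2) (m - (k + 1)) := by
        have : m - k = (m - (k + 1)) + 1 := by omega
        rw [this, List.range'_succ]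
      rw [hr]
      simp
    · have : k = m := by omega
      subst this
      rw [loopA, if_pos (by omega)]
      simp

-- Newton isqrt = Nat.sqrt
theorem amgm_step (x y : Nat) (h : Nat.sqrt x ≤ y) : Nat.sqrt x ≤ (y + x / y) / 2 := by
  rcases Nat.eq_zero_or_pos (Nat.sqrt x) with h0 | hpos
  · rw [h0]; exact Nat.zero_le _
  · have hy : 1 ≤ y := le_trans hpos h
    have hsx : Nat.sqrt x * Nat.sqrt x ≤ x := by simpa [sq] using Nat.sqrt_le' x
    have hqc : Nat.sqrt x * Nat.sqrt x / y ≤ x / y := Nat.div_le_div_right hsx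
    have hdm := Nat.div_add_mod (Nat.sqrt x * Nat.sqrt x) y
    have hmlt := Nat.mod_lt (Nat.sqrt x * Nat.sqrt x) (show 0 < y by omega)
    set s := Nat.sqrt x with hs
    generalize hc : x / y = c at hqc ⊢
    generalize hqq : s * s / y = q at hqc hdm
    generalize hrem : s * s % y = rem at hdm hmlt
    have key : 2 * s ≤ y + c := by
      by_contra hcon
      have hq2 : (q : Int) ≤ 2 * (s : Int) - y - 1 := by omega
      have hmul : (y : Int) * q ≤ (y : Int) * (2 * (s : Int) - y - 1) :=
        mul_le_mul_of_nonneg_left hq2 (by positivity)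
      have hss : (y : Int) * q + rem = (s : Int) * s := by exact_mod_cast hdm
      have hmI : ((rem : Int)) < (y : Int) := by exact_mod_cast hmlt
      nlinarith [sq_nonneg ((s : Int) - (y : Int))]
    omega

theorem isqrtAux_correct (x : Nat) : ∀ (r y : Nat), Nat.sqrt x ≤ r → Nat.sqrt x ≤ y →
    (r ≤ y → r * r ≤ x) → isqrtAux x r y = Nat.sqrt x := by
  intro r
  induction r using Nat.strong_induction_on with
  | _ r ih =>
    intro y hr hy hstop
    rw [isqrtAux]
    split
    · next hlt =>
      refine ih y hlt _ hy (amgm_step x y hy) ?_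
      intro hle
      rcases Nat.eq_zero_or_pos y with h0 | hpos
      · subst h0; simp
      · have hms := Nat.div_mul_le_self x y
        generalize hc : x / y = c at hle hms
        have hyc : y ≤ c := by omega
        nlinarith
    · next hge =>
      have hle : r ≤ y := by omega
      have hrr := hstop hle
      have : r ≤ Nat.sqrt x := Nat.le_sqrt.mpr hrr
      omega

theorem isqrtNewton_eq (x : Nat) : isqrtNewton x = Nat.sqrt x := by
  unfold isqrtNewton
  apply isqrtAux_correct
  · exact Nat.sqrt_le_self x
  · have hs : Nat.sqrt x * Nat.sqrt x ≤ x := by simpa [sq] using Nat.sqrt_le' x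
    have h2 : 2 * Nat.sqrt x ≤ Nat.sqrt x * Nat.sqrt x + 1 := by nlinarith
    omega
  · intro hxy
    have : x ≤ 1 := by omega
    nlinarith

-- the B-side index is the maximal triangular index
theorem m_bounds (n : Int) (hn : 1 ≤ n) :
    T ((isqrtNewton (8 * n + 1).toNat - 1) / 2) ≤ n ∧
      n < T ((isqrtNewton (8 * n + 1).toNat - 1) / 2) + (((isqrtNewton (8 * n + 1).toNat - 1) / 2 : Nat) : Int) + 1 := by
  set N := (8 * n + 1).toNat with hNdef
  have hN : (N : Int) = 8 * n + 1 := Int.toNat_of_nonneg (by omega)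
  rw [isqrtNewton_eq]
  set s := Nat.sqrt N with hsdef
  set m := (s - 1) / 2 with hmdef
  have hs1 : s * s ≤ N := by simpa [sq] using Nat.sqrt_le' N
  have hs2 : N < (s + 1) * (s + 1) := by simpa [sq, Nat.succ_eq_add_one] using Nat.lt_succ_sqrt' N
  have hs3 : 3 ≤ s := Nat.le_sqrt.mpr (by omega)
  have hms : 2 * m + 1 ≤ s ∧ s ≤ 2 * m + 2 := by omega
  have hlow : (2 * m + 1) * (2 * m + 1) ≤ N := le_trans (Nat.mul_le_mul hms.1 hms.1) hs1
  have hhigh : N < (2 * m + 3) * (2 * m + 3) :=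
    lt_of_lt_of_le hs2 (Nat.mul_le_mul (by omega) (by omega))
  have h2T : 2 * T m = (m : Int) * ((m : Int) + 1) := two_T m
  have hlowI : (((2 * m + 1) * (2 * m + 1) : Nat) : Int) ≤ 8 * n + 1 := by
    rw [← hN]; exact_mod_cast hlow
  have hhighI : (8 * n + 1 : Int) < (((2 * m + 3) * (2 * m + 3) : Nat) : Int) := by
    rw [← hN]; exact_mod_cast hhigh
  push_cast at hlowI hhighI
  constructor
  · nlinarith
  · nlinarith

theorem main_eq (n : Int) (hn : 1 ≤ n) : greedy2 n = greedy2_alt n := by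
  obtain ⟨h1, h2⟩ := m_bounds n hn
  set m := (isqrtNewton (8 * n + 1).toNat - 1) / 2 with hmdef
  have hm1 : 1 ≤ m := by
    by_contra h
    have hm0 : m = 0 := by omega
    rw [hm0] at h1 h2
    simp [T] at h1 h2
    omega
  have hmn : (m : Int) ≤ n := le_trans (T_ge m) h1
  have hfuel : m - 0 ≤ n.toNat + 1 := by omega
  have hloop := loopA_spec n m h1 (by omega) (n.toNat + 1) 0 [] (by omega) hfuel
  simp only [T, Nat.cast_zero, zero_add, Nat.sub_zero, List.nil_append] at hloop
  unfold greedy2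
  simp only [hloop]
  have hcond : n - T m ≤ ((m : Int) + 1) - 1 := by omega
  rw [if_pos hcond]
  unfold greedy2_alt
  rw [T_closed]

-- ===== VERDICT (by name: the statement is the Claim_ definition above) =====
theorem greedy2_spec : Claim_equal_greedy2 := by
  intro n _ hpre
  unfold Spec_greedy2
  exact main_eq n hpre
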